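-- pv_equiv track=rewrite | github.com/modr00cka/weak_hierarchical_confusion | hierarchical_confusion.py | unravel_rolled_filter
-- ===== SOURCE A (Python) =====
-- from collections import defaultdict
--
-- def unravel_rolled_filter(r,c,v, oof_id = 9000):
--     counter = defaultdict(int)
--     for i in range(len(r)):
--         counter[(r[i], c[i])]+=v[i]
--     rows = [oof_id]
--     cols = [oof_id]
--     vals = [0]
--
--     for key in counter.keys():
--         rows.append(key[0])
--         cols.append(key[1])
--         vals.append(counter[key])
--     return rows, cols, vals
-- ===== SOURCE B (Python) =====
-- def unravel_rolled_filter(r, c, v, oof_id=9000):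
--     # single fused pass: keep each key's position in the output lists, accumulate in place
--     rows, cols, vals = [oof_id], [oof_id], [0]
--     seen = {}
--     for rr, cc, vv in zip(r, c, v):
--         j = seen.get((rr, cc))
--         if j is None:
--             seen[(rr, cc)] = len(vals)
--             rows.append(rr)
--             cols.append(cc)
--             vals.append(vv)
--         else:
--             vals[j] += vv
--     return rows, cols, vals
-- ===== Notes on version B (the rewrite author's own statement) =====
-- stated objective: alternative
-- what changed: B fuses A's two phases (aggregate into a defaultdict, then emit rows/cols/vals) into a single pass that builds the three output lists directly, keeping a dict from key to output position and accumulating vals in place; Pre_ excludes inputs where c or v is shorter than r, on which A raises IndexError while B's zip would truncate.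
import Mathlib
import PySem

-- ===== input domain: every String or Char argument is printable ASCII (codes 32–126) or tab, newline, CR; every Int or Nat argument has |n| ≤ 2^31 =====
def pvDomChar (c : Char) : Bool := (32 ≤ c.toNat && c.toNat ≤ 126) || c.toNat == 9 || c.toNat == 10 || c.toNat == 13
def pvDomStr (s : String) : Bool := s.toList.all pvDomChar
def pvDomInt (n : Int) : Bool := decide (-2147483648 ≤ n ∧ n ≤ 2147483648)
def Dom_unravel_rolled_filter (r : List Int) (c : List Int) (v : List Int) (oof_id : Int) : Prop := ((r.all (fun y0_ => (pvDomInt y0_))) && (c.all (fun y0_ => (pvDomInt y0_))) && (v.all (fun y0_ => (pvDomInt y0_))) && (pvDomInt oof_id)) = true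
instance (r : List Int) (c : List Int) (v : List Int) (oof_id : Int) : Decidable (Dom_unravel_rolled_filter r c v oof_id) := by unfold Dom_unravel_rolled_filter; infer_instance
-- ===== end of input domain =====

-- B fuses A's aggregate-into-defaultdict-then-emit into a single pass that builds the three
-- output lists directly, keeping each key's output position and accumulating vals in place
-- (objective: alternative decomposition, same results).

-- ===== PORT A =====
def unravel_rolled_filter (r : List Int) (c : List Int) (v : List Int) (oof_id : Int) : List Int × List Int × List Int :=
  let counter : PySem.Dict (Int × Int) Int :=
    (PySem.List.pyRange 0 (r.length : Int) 1).foldl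
      (fun d i => d.modify (PySem.List.pyGetD r i 0, PySem.List.pyGetD c i 0) 0 (· + PySem.List.pyGetD v i 0))
      PySem.Dict.empty
  counter.keys.foldl
    (fun acc k => (acc.1 ++ [k.1], acc.2.1 ++ [k.2], acc.2.2 ++ [counter.getD k 0]))
    ([oof_id], [oof_id], [(0 : Int)])

-- ===== PORT B =====
-- B-side helper: the body of Source B's single loop (state = rows, cols, vals, seen)
def pvStepB (st : List Int × List Int × List Int × PySem.Dict (Int × Int) Nat)
    (t : Int × Int × Int) : List Int × List Int × List Int × PySem.Dict (Int × Int) Nat :=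
  match st.2.2.2.get? (t.1, t.2.1) with
  | none => (st.1 ++ [t.1], st.2.1 ++ [t.2.1], st.2.2.1 ++ [t.2.2],
             st.2.2.2.insert (t.1, t.2.1) st.2.2.1.length)
  | some j => (st.1, st.2.1, st.2.2.1.modify j (· + t.2.2), st.2.2.2)

def unravel_rolled_filter_alt (r : List Int) (c : List Int) (v : List Int) (oof_id : Int) : List Int × List Int × List Int :=
  let st := (r.zip (c.zip v)).foldl pvStepB ([oof_id], [oof_id], [(0 : Int)], PySem.Dict.empty)
  (st.1, st.2.1, st.2.2.1)

-- ===== PRECONDITION & SPEC =====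
-- Pre_ excludes exactly the inputs where A raises IndexError: c or v shorter than r.
def Pre_unravel_rolled_filter (r : List Int) (c : List Int) (v : List Int) (oof_id : Int) : Prop :=
  r.length ≤ c.length ∧ r.length ≤ v.length
instance (r : List Int) (c : List Int) (v : List Int) (oof_id : Int) : Decidable (Pre_unravel_rolled_filter r c v oof_id) := by unfold Pre_unravel_rolled_filter; infer_instance

def pvWitness_unravel_rolled_filter : List Int × List Int × List Int × Int :=
  ([1, 1, 2], [2, 2, 3], [5, 7, 9], 9000)

def Spec_unravel_rolled_filter (r : List Int) (c : List Int) (v : List Int) (oof_id : Int) (out : List Int × List Int × List Int) : Prop := out = unravel_rolled_filter_alt r c v oof_id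
instance (r : List Int) (c : List Int) (v : List Int) (oof_id : Int) (out : List Int × List Int × List Int) : Decidable (Spec_unravel_rolled_filter r c v oof_id out) := by unfold Spec_unravel_rolled_filter; infer_instance

-- ===== CLAIM (what is proved, stated in full; the proofs are below) =====
def Claim_equal_unravel_rolled_filter : Prop := ∀ (r : List Int) (c : List Int) (v : List Int) (oof_id : Int), Dom_unravel_rolled_filter r c v oof_id → Pre_unravel_rolled_filter r c v oof_id → Spec_unravel_rolled_filter r c v oof_id (unravel_rolled_filter r c v oof_id)

-- ===== LEMMAS AND PROOFS =====

-- A's counter as a fold over the triple list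
def pvCnt (ts : List (Int × Int × Int)) : PySem.Dict (Int × Int) Int :=
  ts.foldl (fun d t => d.modify (t.1, t.2.1) 0 (· + t.2.2)) PySem.Dict.empty

-- the association list (K[0], n), (K[1], n+1), …
def pvIdx : List (Int × Int) → Nat → List ((Int × Int) × Nat)
  | [], _ => []
  | k :: ks, n => (k, n) :: pvIdx ks (n + 1)

theorem pv_nodup_keys_pvCnt (ts : List (Int × Int × Int)) : (pvCnt ts).keys.Nodup := by
  unfold pvCnt
  exact PySem.Dict.nodup_keys_foldl_modify_key ts (fun t => (t.1, t.2.1)) 0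
    (fun _ t => (· + t.2.2)) PySem.Dict.empty (by simp)

theorem pv_get?_pvIdx_of_not_mem (K : List (Int × Int)) :
    ∀ (n : Nat) (k : Int × Int), k ∉ K → (PySem.Dict.mk (pvIdx K n)).get? k = none := by
  induction K with
  | nil => intro n k _; simp [pvIdx, PySem.Dict.get?]
  | cons a K ih =>
    intro n k h
    rw [List.mem_cons, not_or] at h
    have ha : ¬(a == k) = true := by simp only [beq_iff_eq]; intro h2; exact h.1 h2.symm
    simp only [pvIdx, PySem.Dict.get?_mk_cons, if_neg ha]
    exact ih (n + 1) k h.2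

theorem pv_get?_pvIdx_of_getElem (K : List (Int × Int)) :
    ∀ (n i : Nat) (k : Int × Int), K.Nodup → ∀ (hi : i < K.length), K[i] = k →
      (PySem.Dict.mk (pvIdx K n)).get? k = some (n + i) := by
  induction K with
  | nil => intro n i k _ hi; simp at hi
  | cons a K ih =>
    intro n i k hnd hi hk
    match i with
    | 0 =>
      simp only [List.getElem_cons_zero] at hk
      simp [pvIdx, PySem.Dict.get?_mk_cons, hk]
    | i + 1 =>
      simp only [List.getElem_cons_succ] at hk
      have hi' : i < K.length := by simp only [List.length_cons] at hi; omega
      have hmem : k ∈ K := hk ▸ List.getElem_mem _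
      have ha : ¬(a == k) = true := by
        have hnin : a ∉ K := (List.nodup_cons.mp hnd).1
        simp only [beq_iff_eq]
        rintro rfl; exact hnin hmem
      simp only [pvIdx, PySem.Dict.get?_mk_cons, if_neg ha]
      rw [ih (n + 1) i k (List.nodup_cons.mp hnd).2 hi' hk]
      congr 1
      omega

theorem pv_pvIdx_append (K : List (Int × Int)) (k : Int × Int) (n : Nat) :
    pvIdx (K ++ [k]) n = pvIdx K n ++ [(k, n + K.length)] := by
  induction K generalizing n with
  | nil => simp [pvIdx]
  | cons a K ih => simp [pvIdx, ih]; omega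

theorem pv_modify_cons (x : Int) (l : List Int) (i : Nat) (f : Int → Int) :
    (x :: l).modify (1 + i) f = x :: l.modify i f := by
  rw [Nat.add_comm]
  simp [List.modify]

-- loop invariant of B's single pass: state = A's counter's keys and values plus the index dict
theorem pv_invB (oof : Int) (ts : List (Int × Int × Int)) :
    ts.foldl pvStepB ([oof], [oof], [(0 : Int)], PySem.Dict.empty)
      = (oof :: (pvCnt ts).keys.map (fun k => k.1),
         oof :: (pvCnt ts).keys.map (fun k => k.2),
         (0 : Int) :: (pvCnt ts).keys.map (fun k => (pvCnt ts).getD k 0),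
         PySem.Dict.mk (pvIdx (pvCnt ts).keys 1)) := by
  induction ts using List.reverseRecOn with
  | nil => rfl
  | append_singleton ts t ih =>
    have hnd : (pvCnt ts).keys.Nodup := pv_nodup_keys_pvCnt ts
    rw [List.foldl_append, List.foldl_cons, List.foldl_nil, ih]
    have hcnt : pvCnt (ts ++ [t]) = (pvCnt ts).modify (t.1, t.2.1) 0 (· + t.2.2) := by
      simp [pvCnt]
    by_cases hmem : (t.1, t.2.1) ∈ (pvCnt ts).keys
    · -- key already present: vals accumulates in place at its stored position
      have hcont : (pvCnt ts).contains (t.1, t.2.1) = true :=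
        (PySem.Dict.contains_iff_mem_keys _ _).mpr hmem
      have hkeys : (pvCnt (ts ++ [t])).keys = (pvCnt ts).keys := by
        rw [hcnt, PySem.Dict.keys_modify, PySem.Dict.keys_insert_of_contains _ _ hcont]
      have hi : (pvCnt ts).keys.idxOf (t.1, t.2.1) < (pvCnt ts).keys.length :=
        List.idxOf_lt_length_of_mem hmem
      have hget : (PySem.Dict.mk (pvIdx (pvCnt ts).keys 1)).get? (t.1, t.2.1)
          = some (1 + (pvCnt ts).keys.idxOf (t.1, t.2.1)) :=
        pv_get?_pvIdx_of_getElem _ 1 _ _ hnd hi (List.getElem_idxOf hi)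
      simp only [pvStepB, hget]
      simp only [hkeys]
      rw [pv_modify_cons]
      refine Prod.ext rfl (Prod.ext rfl (Prod.ext ?_ rfl))
      simp only [List.cons.injEq, true_and]
      apply List.ext_getElem
      · simp
      · intro p h1 h2
        rw [List.getElem_modify]
        simp only [List.getElem_map, hcnt, PySem.Dict.getD_modify]
        by_cases hp : (pvCnt ts).keys.idxOf (t.1, t.2.1) = p
        · have hpe : (pvCnt ts).keys[p] = (t.1, t.2.1) := by
            subst hp; exact List.getElem_idxOf hi
          simp [hp, hpe]
        · have h3 : p < (pvCnt ts).keys.length := by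
            simpa using h2
          have hpe : (pvCnt ts).keys[p]'h3 ≠ (t.1, t.2.1) := by
            intro hEq
            apply hp
            have := (hnd.getElem_inj_iff (hi := hi) (hj := h3)).mp
              (by rw [List.getElem_idxOf hi, hEq])
            omega
          simp [hp, hpe]
    · -- new key: append to all three lists and record its position
      have hcont : (pvCnt ts).contains (t.1, t.2.1) = false := by
        rw [← Bool.not_eq_true]
        intro hc
        exact hmem ((PySem.Dict.contains_iff_mem_keys _ _).mp hc)
      have hkeys : (pvCnt (ts ++ [t])).keys = (pvCnt ts).keys ++ [(t.1, t.2.1)] := by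
        rw [hcnt, PySem.Dict.keys_modify, PySem.Dict.keys_insert_of_not_contains _ _ hcont]
      have hget : (PySem.Dict.mk (pvIdx (pvCnt ts).keys 1)).get? (t.1, t.2.1) = none :=
        pv_get?_pvIdx_of_not_mem _ 1 _ hmem
      simp only [pvStepB, hget]
      rw [hkeys]
      refine Prod.ext ?_ (Prod.ext ?_ (Prod.ext ?_ ?_))
      · simp
      · simp
      · simp only [List.map_append, List.map_cons, List.map_nil, List.cons_append]
        congr 1
        congr 1
        · apply List.map_congr_left
          intro j hj
          have hne : j ≠ (t.1, t.2.1) := by rintro rfl; exact hmem hj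
          rw [hcnt, PySem.Dict.getD_modify, if_neg hne]
        · rw [hcnt, PySem.Dict.getD_modify, if_pos rfl,
            PySem.Dict.getD_of_not_contains _ _ hcont]
          simp
      · apply PySem.Dict.ext
        rw [PySem.Dict.items_insert_of_not_contains _ _ (by
          rw [PySem.Dict.contains_eq_isSome_get?, hget]; rfl)]
        show pvIdx (pvCnt ts).keys 1 ++ [((t.1, t.2.1), _)] = pvIdx ((pvCnt ts).keys ++ [(t.1, t.2.1)]) 1
        rw [pv_pvIdx_append]
        simp [Nat.add_comm]

-- fold over range(n) applying F i equals fold over a list whose i-th element is F i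
theorem pv_foldl_range_eq {α δ : Type} (xs : List α) (F : Nat → α) (g : δ → α → δ) (init : δ)
    (h : ∀ i (hi : i < xs.length), F i = xs[i]) :
    (List.range xs.length).foldl (fun d i => g d (F i)) init = xs.foldl g init := by
  have hmap : (List.range xs.length).map F = xs := by
    apply List.ext_getElem
    · simp
    · intro i h1 h2; simpa using h i h2
  conv_rhs => rw [← hmap]
  rw [List.foldl_map]

-- the emit loop appends elementwise onto the three accumulators
theorem pv_emit_foldl (keys : List (Int × Int)) (f : Int × Int → Int)
    (A B C : List Int) :
    keys.foldl (fun acc k => (acc.1 ++ [k.1], acc.2.1 ++ [k.2], acc.2.2 ++ [f k])) (A, B, C)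
      = (A ++ keys.map (fun k => k.1), B ++ keys.map (fun k => k.2), C ++ keys.map f) := by
  induction keys generalizing A B C with
  | nil => simp
  | cons k ks ih => simp [ih]

theorem unravel_equal (r c v : List Int) (oof_id : Int)
    (hc : r.length ≤ c.length) (hv : r.length ≤ v.length) :
    unravel_rolled_filter r c v oof_id = unravel_rolled_filter_alt r c v oof_id := by
  unfold unravel_rolled_filter unravel_rolled_filter_alt
  set ts : List (Int × (Int × Int)) := r.zip (c.zip v) with hts
  have hlen : ts.length = r.length := by simp [hts]; omega
  -- the counting fold over range(len r) is the fold over ts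
  have hcounter :
      (PySem.List.pyRange 0 (r.length : Int) 1).foldl
        (fun d i => d.modify (PySem.List.pyGetD r i 0, PySem.List.pyGetD c i 0) 0 (· + PySem.List.pyGetD v i 0))
        PySem.Dict.empty
      = pvCnt ts := by
    rw [PySem.List.pyRange_zero_natCast]
    rw [List.foldl_map]
    simp only [PySem.List.pyGetD_natCast]
    rw [← hlen]
    exact pv_foldl_range_eq ts
      (fun i => (r.getD i 0, c.getD i 0, v.getD i 0))
      (fun d t => d.modify (t.1, t.2.1) 0 (· + t.2.2))
      PySem.Dict.empty
      (by
        intro i hi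
        have hi' : i < r.length := by omega
        simp [hts, List.getElem_zip, List.getD_eq_getElem?_getD,
          hi', Nat.lt_of_lt_of_le hi' hc, Nat.lt_of_lt_of_le hi' hv])
  rw [hcounter]
  rw [pv_emit_foldl (pvCnt ts).keys (fun k => (pvCnt ts).getD k 0) [oof_id] [oof_id] [0]]
  rw [pv_invB oof_id ts]
  simp

-- ===== VERDICT (by name: the statement is the Claim_ definition above) =====
theorem unravel_rolled_filter_spec : Claim_equal_unravel_rolled_filter := by
  intro r c v oof_id _ hpre
  exact unravel_equal r c v oof_id hpre.1 hpre.2
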